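-- pv_equiv track=rewrite | github.com/pythonfastapiaksahoo/PFG_Phase1 | pfg_app/FROps/SplitDoc.py | group_pages
-- ===== SOURCE A (Python) =====
-- def group_pages(data):
--     grouped_pages = []
--     current_group = []
--
--     for page_num, page_data in data.items():
--         # Extract confidence levels
--         invoice_id_confidence = page_data.get("InvoiceId", ["", 0])[1]
--         invoice_date_confidence = page_data.get("InvoiceDate", ["", 0])[1]
--         subtotal_confidence = page_data.get("SubTotal", ["", 0])[1]
--
--         # Determine if a new group should start
--         if invoice_id_confidence > 90 and invoice_date_confidence > 90:
--             # If there's an ongoing group, add it to the grouped_pages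
--             if current_group:
--                 grouped_pages.append(current_group)
--             # Start a new group with the current page
--             current_group = [page_num]
--         elif subtotal_confidence > 90:
--             # If SubTotal has high confidence, add page to the current group
--             current_group.append(page_num)
--         else:
--             # If confidence is low, continue adding the page to the current
--             # group
--             current_group.append(page_num)
--
--     if current_group:
--         grouped_pages.append(current_group)
--
--     return grouped_pages
-- ===== SOURCE B (Python) =====
-- def _boundary(page_data):
--     return (page_data.get("InvoiceId", ["", 0])[1] > 90
--             and page_data.get("InvoiceDate", ["", 0])[1] > 90)
--
--
-- def group_pages(data):
--     pages = list(data.keys())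
--     bounds = [i for i, pd in enumerate(data.values()) if _boundary(pd)]
--     if not bounds:
--         return [pages] if pages else []
--     segments = [pages[:bounds[0]]] if bounds[0] > 0 else []
--     ends = bounds[1:] + [len(pages)]
--     for b, e in zip(bounds, ends):
--         segments.append(pages[b:e])
--     return segments
-- ===== Notes on version B (the rewrite author's own statement) =====
-- stated objective: alternative
-- what changed: Replaces A's single-pass accumulator (pending group mutated page by page, flushed at boundaries and at the end) by a two-phase boundary-then-slice decomposition: collect the indices of high-confidence boundary pages, then cut the page list into segments at those indices.
import Mathlib
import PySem

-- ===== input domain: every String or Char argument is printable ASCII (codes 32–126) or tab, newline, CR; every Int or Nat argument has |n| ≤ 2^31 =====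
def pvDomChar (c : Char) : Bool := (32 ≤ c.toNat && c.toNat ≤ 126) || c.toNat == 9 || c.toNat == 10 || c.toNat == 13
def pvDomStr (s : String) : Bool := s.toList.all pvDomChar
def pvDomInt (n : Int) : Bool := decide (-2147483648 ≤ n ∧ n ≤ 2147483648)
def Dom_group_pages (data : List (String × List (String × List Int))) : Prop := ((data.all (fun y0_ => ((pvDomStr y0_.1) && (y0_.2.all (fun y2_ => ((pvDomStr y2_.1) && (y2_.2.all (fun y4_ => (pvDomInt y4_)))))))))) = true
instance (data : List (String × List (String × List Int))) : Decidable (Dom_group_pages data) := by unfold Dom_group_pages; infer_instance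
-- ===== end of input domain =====

-- B replaces A's one-pass accumulator by a boundary-index + slice decomposition (same cost, different shape: 'alternative').
-- Dicts are association lists; Pre_ excludes duplicate keys and the entries on which A's `[1]` raises IndexError.

-- ===== PORT A =====
-- page_data.get(key, ["", 0])[1]; the default's element 1 is the int 0, so the default list is [0, 0] here
-- (element 0 is never read).  Total proxy: `.getD 0` covers the IndexError case, which Pre_ excludes.
def pvPageConf (pd : List (String × List Int)) (key : String) : Int :=
  (PySem.List.pyGet? (PySem.Dict.getD (PySem.Dict.mk pd) key [0, 0]) 1).getD 0

def group_pages (data : List (String × List (String × List Int))) : List (List String) :=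
  let fin := data.foldl (fun (st : List (List String) × List String) p =>
    let invoice_id_confidence := pvPageConf p.2 "InvoiceId"
    let invoice_date_confidence := pvPageConf p.2 "InvoiceDate"
    let subtotal_confidence := pvPageConf p.2 "SubTotal"
    if invoice_id_confidence > 90 ∧ invoice_date_confidence > 90 then
      ((if st.2 ≠ [] then st.1 ++ [st.2] else st.1), [p.1])
    else if subtotal_confidence > 90 then
      (st.1, st.2 ++ [p.1])
    else
      (st.1, st.2 ++ [p.1])) ([], [])
  if fin.2 ≠ [] then fin.1 ++ [fin.2] else fin.1

-- ===== PORT B =====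
def pvBoundary (pd : List (String × List Int)) : Bool :=
  decide (pvPageConf pd "InvoiceId" > 90) && decide (pvPageConf pd "InvoiceDate" > 90)

def group_pages_alt (data : List (String × List (String × List Int))) : List (List String) :=
  let pages := data.map Prod.fst
  let bounds := ((PySem.List.enumerate (data.map Prod.snd) 0).filter (fun q => pvBoundary q.2)).map (·.1)
  match bounds with
  | [] => if pages = [] then [] else [pages]
  | b0 :: rest =>
    let segments := if b0 > 0 then [PySem.List.slice pages none (some b0)] else []
    let ends := rest ++ [(pages.length : Int)]
    (List.zip (b0 :: rest) ends).foldl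
      (fun segs be => segs ++ [PySem.List.slice pages (some be.1) (some be.2)]) segments

-- ===== PRECONDITION & SPEC =====
-- Pre_ excludes (a) association lists with duplicate page keys or duplicate field keys, on which Python's dict
-- construction collapses entries and the assoc list is not a faithful image of A's input; (b) pages storing an
-- "InvoiceId"/"InvoiceDate"/"SubTotal" value list of fewer than 2 elements, on which A's `[1]` raises IndexError.
def Pre_group_pages (data : List (String × List (String × List Int))) : Prop :=
  (data.map Prod.fst).Nodup ∧
    ∀ p ∈ data, (p.2.map Prod.fst).Nodup ∧
      ∀ kv ∈ p.2, (kv.1 = "InvoiceId" ∨ kv.1 = "InvoiceDate" ∨ kv.1 = "SubTotal") → 2 ≤ kv.2.length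
instance (data : List (String × List (String × List Int))) : Decidable (Pre_group_pages data) := by
  unfold Pre_group_pages; infer_instance

def pvWitness_group_pages : (List (String × List (String × List Int))) :=
  [("1", [("InvoiceId", [7, 95]), ("InvoiceDate", [3, 95])]),
   ("2", [("SubTotal", [9, 95])]),
   ("3", [])]

def Spec_group_pages (data : List (String × List (String × List Int))) (out : List (List String)) : Prop := out = group_pages_alt data
instance (data : List (String × List (String × List Int))) (out : List (List String)) : Decidable (Spec_group_pages data out) := by unfold Spec_group_pages; infer_instance

-- ===== CLAIM (what is proved, stated in full; the proofs are below) =====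
def Claim_equal_group_pages : Prop := ∀ (data : List (String × List (String × List Int))), Dom_group_pages data → Pre_group_pages data → Spec_group_pages data (group_pages data)

-- ===== LEMMAS AND PROOFS =====

-- Recursive characterisation of the grouping, with the pending group as accumulator.
def gRec : List (String × List (String × List Int)) → List String → List (List String)
  | [], c => if c = [] then [] else [c]
  | p :: ps, c =>
    if pvBoundary p.2 then (if c = [] then [] else [c]) ++ gRec ps [p.1]
    else gRec ps (c ++ [p.1])

-- Nat-valued boundary indices.
def nIdx : List (String × List (String × List Int)) → List Nat
  | [] => []
  | p :: ps => if pvBoundary p.2 then 0 :: (nIdx ps).map (· + 1) else (nIdx ps).map (· + 1)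

-- Nat-index view of B's slicing phase, generalised by a prefix accumulator c.
def segs (c : List String) (pages : List String) : List Nat → List (List String)
  | [] => if c ++ pages = [] then [] else [c ++ pages]
  | b0 :: rest =>
    (if c ++ pages.take b0 = [] then [] else [c ++ pages.take b0]) ++
      (List.zip (b0 :: rest) (rest ++ [pages.length])).map
        (fun be => (pages.drop be.1).take (be.2 - be.1))

def pvStepA (st : List (List String) × List String) (p : String × List (String × List Int)) :
    List (List String) × List String :=
  if pvPageConf p.2 "InvoiceId" > 90 ∧ pvPageConf p.2 "InvoiceDate" > 90 then
    ((if st.2 ≠ [] then st.1 ++ [st.2] else st.1), [p.1])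
  else (st.1, st.2 ++ [p.1])

theorem group_pages_eq_step (data : List (String × List (String × List Int))) :
    group_pages data =
      (let fin := data.foldl pvStepA ([], [])
       if fin.2 ≠ [] then fin.1 ++ [fin.2] else fin.1) := by
  unfold group_pages
  have : (fun (st : List (List String) × List String) (p : String × List (String × List Int)) =>
      let invoice_id_confidence := pvPageConf p.2 "InvoiceId"
      let invoice_date_confidence := pvPageConf p.2 "InvoiceDate"
      let subtotal_confidence := pvPageConf p.2 "SubTotal"
      if invoice_id_confidence > 90 ∧ invoice_date_confidence > 90 then
        ((if st.2 ≠ [] then st.1 ++ [st.2] else st.1), [p.1])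
      else if subtotal_confidence > 90 then
        (st.1, st.2 ++ [p.1])
      else
        (st.1, st.2 ++ [p.1])) = pvStepA := by
    funext st p
    simp only [pvStepA, ite_self]
  rw [this]

theorem A_fold_eq_gRec (l : List (String × List (String × List Int)))
    (g : List (List String)) (c : List String) :
    (let fin := l.foldl pvStepA (g, c)
     if fin.2 ≠ [] then fin.1 ++ [fin.2] else fin.1) = g ++ gRec l c := by
  induction l generalizing g c with
  | nil => simp only [List.foldl_nil, gRec]; by_cases h : c = [] <;> simp [h]
  | cons p ps ih =>
    simp only [List.foldl_cons, gRec]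
    by_cases hb : pvPageConf p.2 "InvoiceId" > 90 ∧ pvPageConf p.2 "InvoiceDate" > 90
    · have hbB : pvBoundary p.2 = true := by simp [pvBoundary, hb.1, hb.2]
      rw [show pvStepA (g, c) p = ((if c ≠ [] then g ++ [c] else g), [p.1]) by
        simp [pvStepA, if_pos hb]]
      simp only [hbB, if_true]
      rw [ih]
      by_cases hc : c = [] <;> simp [hc]
    · have hbB : pvBoundary p.2 = false := by
        rcases not_and_or.mp hb with h | h <;> simp [pvBoundary, h]
      rw [show pvStepA (g, c) p = (g, c ++ [p.1]) by simp [pvStepA, if_neg hb]]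
      simp only [hbB, Bool.false_eq_true, if_false]
      exact ih g (c ++ [p.1])

theorem nIdx_lt (l : List (String × List (String × List Int))) :
    ∀ n ∈ nIdx l, n < l.length := by
  induction l with
  | nil => simp [nIdx]
  | cons p ps ih =>
    intro n hn
    simp only [nIdx] at hn
    by_cases hb : pvBoundary p.2
    · rw [if_pos hb] at hn
      simp only [List.mem_cons, List.mem_map] at hn
      rcases hn with rfl | ⟨m, hm, rfl⟩
      · simp
      · have := ih m hm; simp only [List.length_cons]; omega
    · rw [if_neg hb] at hn
      simp only [List.mem_map] at hn
      rcases hn with ⟨m, hm, rfl⟩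
      have := ih m hm; simp only [List.length_cons]; omega

theorem enum_filter_eq_nIdx (l : List (String × List (String × List Int))) (s : Int) :
    ((PySem.List.enumerate (l.map Prod.snd) s).filter (fun q => pvBoundary q.2)).map (·.1)
      = (nIdx l).map (fun n : Nat => s + (n : Int)) := by
  induction l generalizing s with
  | nil => simp [PySem.List.enumerate_nil, nIdx]
  | cons p ps ih =>
    simp only [List.map_cons, PySem.List.enumerate_cons, List.filter_cons, nIdx]
    by_cases hb : pvBoundary p.2
    · simp only [hb, if_true, List.map_cons, ih (s + 1), List.map_map, Nat.cast_zero, add_zero]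
      congr 1
      apply List.map_congr_left
      intro m hm
      simp only [Function.comp_apply]
      push_cast; ring
    · simp only [hb, Bool.false_eq_true, if_false, ih (s + 1), List.map_map]
      apply List.map_congr_left
      intro m hm
      simp only [Function.comp_apply]
      push_cast; ring

-- index-shift for the slice phase
theorem zip_shift_slices (x : String) (pages : List String) (bs es : List Nat) :
    (List.zip (bs.map (· + 1)) (es.map (· + 1))).map
        (fun be => ((x :: pages).drop be.1).take (be.2 - be.1))
      = (List.zip bs es).map (fun be => (pages.drop be.1).take (be.2 - be.1)) := by
  induction bs generalizing es with
  | nil => simp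
  | cons b bs ih =>
    cases es with
    | nil => simp
    | cons e es => simp [List.zip_cons_cons, ih, Nat.succ_sub_succ]

theorem tail_shift (x : String) (pages : List String) (b1 : Nat) (rr : List Nat) :
    (List.zip ((b1 + 1) :: rr.map (· + 1)) (rr.map (· + 1) ++ [(x :: pages).length])).map
        (fun be => ((x :: pages).drop be.1).take (be.2 - be.1))
      = (List.zip (b1 :: rr) (rr ++ [pages.length])).map
        (fun be => (pages.drop be.1).take (be.2 - be.1)) := by
  rw [show (b1 + 1) :: rr.map (· + 1) = (b1 :: rr).map (· + 1) by simp,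
      show rr.map (· + 1) ++ [(x :: pages).length] = (rr ++ [pages.length]).map (· + 1) by simp,
      zip_shift_slices]

theorem segs_shift_boundary (x : String) (pages : List String) (bs : List Nat) (c : List String) :
    segs c (x :: pages) (0 :: bs.map (· + 1)) = (if c = [] then [] else [c]) ++ segs [x] pages bs := by
  cases bs with
  | nil => simp [segs]
  | cons b1 rr =>
    simp only [List.map_cons, segs, List.take_zero, List.append_nil]
    rw [show (b1 + 1) :: rr.map (· + 1) ++ [(x :: pages).length]
          = ((b1 + 1) :: rr.map (· + 1)) ++ [(x :: pages).length] by simp]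
    rw [show List.zip (0 :: (b1 + 1) :: rr.map (· + 1)) (((b1 + 1) :: rr.map (· + 1)) ++ [(x :: pages).length])
          = (0, b1 + 1) :: List.zip ((b1 + 1) :: rr.map (· + 1)) (rr.map (· + 1) ++ [(x :: pages).length]) by
        simp [List.zip_cons_cons]]
    rw [List.map_cons, tail_shift]
    simp

theorem segs_shift_nonboundary (x : String) (pages : List String) (bs : List Nat) (c : List String) :
    segs c (x :: pages) (bs.map (· + 1)) = segs (c ++ [x]) pages bs := by
  cases bs with
  | nil => simp [segs]
  | cons b1 rr =>
    simp only [List.map_cons, segs, List.take_succ_cons]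
    rw [tail_shift]
    rw [show c ++ x :: List.take b1 pages = (c ++ [x]) ++ List.take b1 pages by simp]

theorem segs_eq_gRec (l : List (String × List (String × List Int))) (c : List String) :
    segs c (l.map Prod.fst) (nIdx l) = gRec l c := by
  induction l generalizing c with
  | nil => simp [segs, nIdx, gRec]
  | cons p ps ih =>
    simp only [List.map_cons, nIdx, gRec]
    by_cases hb : pvBoundary p.2
    · simp only [hb, if_true, segs_shift_boundary, ih]
    · simp only [hb, Bool.false_eq_true, if_false, segs_shift_nonboundary, ih]

theorem alt_eq_segs (data : List (String × List (String × List Int))) :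
    group_pages_alt data = segs [] (data.map Prod.fst) (nIdx data) := by
  unfold group_pages_alt
  rw [enum_filter_eq_nIdx data 0]
  simp only [zero_add]
  cases hbs : nIdx data with
  | nil => simp [segs]
  | cons b0 r =>
    have hb0 : b0 < data.length := nIdx_lt data b0 (by rw [hbs]; exact List.mem_cons_self ..)
    simp only [List.map_cons, PySem.List.foldl_append_singleton_eq_map, segs, List.nil_append]
    have hzip : List.zip ((b0 : Int) :: r.map (fun n : Nat => (n : Int))) (r.map (fun n : Nat => (n : Int)) ++ [((data.map Prod.fst).length : Int)])
        = (List.zip (b0 :: r) (r ++ [(data.map Prod.fst).length])).map (Prod.map (fun n : Nat => (n : Int)) (fun n : Nat => (n : Int))) := by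
      rw [show ((b0 : Int) :: r.map (fun n : Nat => (n : Int))) = (b0 :: r).map (fun n : Nat => (n : Int)) by simp,
        show (r.map (fun n : Nat => (n : Int)) ++ [((data.map Prod.fst).length : Int)]) = (r ++ [(data.map Prod.fst).length]).map (fun n : Nat => (n : Int)) by simp]
      exact List.zip_map ..
    rw [hzip, List.map_map]
    have hseg : ∀ be : Nat × Nat,
        PySem.List.slice (data.map Prod.fst) (some (be.1 : Int)) (some (be.2 : Int))
          = ((data.map Prod.fst).drop be.1).take (be.2 - be.1) := fun be =>
      PySem.List.slice_natCast ..
    have hlead : (if (b0 : Int) > 0 then [PySem.List.slice (data.map Prod.fst) none (some (b0 : Int))] else [])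
        = (if ([] : List String) ++ (data.map Prod.fst).take b0 = [] then [] else [[] ++ (data.map Prod.fst).take b0]) := by
      by_cases h0 : b0 = 0
      · simp [h0]
      · have hpos : (0 : Int) < (b0 : Int) := by exact_mod_cast Nat.pos_of_ne_zero h0
        have hne : (data.map Prod.fst).take b0 ≠ [] := by
          have hd : data ≠ [] := by intro h; rw [h] at hb0; simp at hb0
          simp [List.take_eq_nil_iff, List.map_eq_nil_iff, h0, hd]
        simp [hne, PySem.List.slice_to_natCast, h0]
    rw [hlead]
    congr 1
    apply List.map_congr_left; intro be _
    simp only [Function.comp_apply]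
    exact hseg be

-- ===== VERDICT (by name: the statement is the Claim_ definition above) =====
theorem group_pages_spec : Claim_equal_group_pages := by
  intro data _ _
  unfold Spec_group_pages
  rw [group_pages_eq_step, A_fold_eq_gRec, List.nil_append, alt_eq_segs, segs_eq_gRec]
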